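-- pv_equiv track=rewrite | github.com/jeonghyeonee/programmers_python_level1 | 약수개수와덧셈.py | solution
-- ===== SOURCE A (Python) =====
-- def solution(left, right):
--     sum = 0
--     for i in range(left, right+1):
--         cnt = 0
--         for j in range(1, i+1):
--             if i%j == 0:
--                 cnt += 1
--         if cnt%2 == 0:
--             sum += i
--         else:
--             sum -= i
--     return sum
-- ===== SOURCE B (Python) =====
-- def solution(left, right):
--     # total of the whole range, then flip the sign of the perfect squares
--     # (a positive integer has an odd number of divisors iff it is a perfect square;
--     #  non-positive i contribute +i since their divisor count in A is 0, which is even)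
--     if right < left:
--         return 0
--     total = (left + right) * (right - left + 1) // 2
--     s = 0
--     k = 1
--     while k * k <= right:
--         if k * k >= left:
--             s += k * k
--         k += 1
--     return total - 2 * s
-- ===== Notes on version B (the rewrite author's own statement) =====
-- stated objective: alternative
-- what changed: Replaces the per-number divisor-counting double loop by a closed-form range sum minus twice the perfect squares in the range (odd divisor count iff perfect square), enumerated by a single k*k <= right loop.
import Mathlib
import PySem

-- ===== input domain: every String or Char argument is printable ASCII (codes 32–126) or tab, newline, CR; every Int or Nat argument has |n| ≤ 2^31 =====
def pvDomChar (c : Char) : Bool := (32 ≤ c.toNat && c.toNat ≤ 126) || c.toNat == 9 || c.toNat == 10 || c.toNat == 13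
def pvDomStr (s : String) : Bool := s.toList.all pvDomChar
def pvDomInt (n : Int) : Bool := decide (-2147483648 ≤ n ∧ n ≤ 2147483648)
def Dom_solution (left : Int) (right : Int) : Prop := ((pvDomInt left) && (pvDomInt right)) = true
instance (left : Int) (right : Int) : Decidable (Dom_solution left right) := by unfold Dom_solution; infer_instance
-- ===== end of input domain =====

-- B replaces A's per-number divisor-counting double loop by a closed-form range sum
-- minus twice the perfect squares in the range, enumerated by a single k*k ≤ right loop
-- (objective: alternative algorithm).

-- ===== PORT A =====
def solution (left : Int) (right : Int) : Int :=
  (PySem.List.pyRange left (right + 1) 1).foldl (fun sum i =>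
    let cnt : Int := (PySem.List.pyRange 1 (i + 1) 1).foldl
      (fun cnt j => if PySem.Int.mod i j = 0 then cnt + 1 else cnt) 0
    if PySem.Int.mod cnt 2 = 0 then sum + i else sum - i) 0

-- ===== PORT B =====
-- the 'while k*k <= right' loop of Source B, with its accumulator s
def sqLoop (left : Int) (right : Int) (k : Int) (s : Int) : Int :=
  if _h : k * k ≤ right then
    sqLoop left right (k + 1) (if left ≤ k * k then s + k * k else s)
  else s
termination_by (right + 1 - k).toNat
decreasing_by
  have hk : k ≤ right := by nlinarith [sq_nonneg k, sq_nonneg (k - 1)]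
  omega

def solution_alt (left : Int) (right : Int) : Int :=
  if right < left then 0
  else
    let total := PySem.Int.floordiv ((left + right) * (right - left + 1)) 2
    total - 2 * sqLoop left right 1 0

-- ===== PRECONDITION & SPEC =====
def Spec_solution (left : Int) (right : Int) (out : Int) : Prop := out = solution_alt left right
instance (left : Int) (right : Int) (out : Int) : Decidable (Spec_solution left right out) := by unfold Spec_solution; infer_instance

-- ===== CLAIM (what is proved, stated in full; the proofs are below) =====
def Claim_equal_solution : Prop := ∀ (left : Int) (right : Int), Dom_solution left right → Spec_solution left right (solution left right)

-- ===== LEMMAS AND PROOFS =====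

-- the per-element contribution: negate perfect squares (which are ≥ 1), keep everything else
def pvG (i : Int) : Int :=
  if 1 ≤ i ∧ Nat.sqrt i.toNat * Nat.sqrt i.toNat = i.toNat then -i else i

-- A's inner divisor count
def pvCnt (i : Int) : Int :=
  (PySem.List.pyRange 1 (i + 1) 1).foldl
    (fun cnt j => if PySem.Int.mod i j = 0 then cnt + 1 else cnt) 0

-- counting fold = countP
lemma pv_count_fold (p : Int → Prop) [DecidablePred p] (l : List Int) (c : Int) :
    l.foldl (fun cnt j => if p j then cnt + 1 else cnt) c
      = c + (l.countP (fun j => decide (p j))) := by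
  induction l generalizing c with
  | nil => simp
  | cons x xs ih =>
    by_cases hx : p x <;> simp [hx, ih] <;> ring

-- pvCnt for positive i is the number of divisors
-- countP over List.range = card of the filtered Finset.range
lemma pv_countP_range (p : ℕ → Prop) [DecidablePred p] (n : ℕ) :
    (List.range n).countP (fun k => decide (p k)) = ((Finset.range n).filter p).card := by
  induction n with
  | zero => simp
  | succ m ih =>
    rw [List.range_succ, List.countP_append, Finset.range_add_one, Finset.filter_insert]
    by_cases hm : p m
    · rw [if_pos hm, Finset.card_insert_of_notMem (by simp), ← ih]
      simp [hm]
    · rw [if_neg hm, ← ih]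
      simp [hm]

lemma pv_cnt_eq_card (n : ℕ) (hn : 1 ≤ n) :
    pvCnt (n : Int) = ((n : ℕ).divisors.card : Int) := by
  unfold pvCnt
  rw [pv_count_fold (fun j => PySem.Int.mod (n : Int) j = 0)]
  rw [PySem.List.pyRange_one]
  have hcast : (((n : Int) + 1 - 1)).toNat = n := by omega
  rw [hcast, List.countP_map]
  have hcnt : (List.range n).countP
        ((fun j => decide (PySem.Int.mod (n : Int) j = 0)) ∘ (fun k : ℕ => 1 + (k : Int)))
      = (List.range n).countP (fun k => decide ((1 + k) ∣ n)) := by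
    apply List.countP_congr
    intro k _
    simp only [Function.comp_apply, decide_eq_true_eq]
    rw [PySem.Int.mod_eq_zero_iff_dvd]
    constructor
    · intro h
      have h2 : ((1 + k : ℕ) : Int) ∣ ((n : ℕ) : Int) := by push_cast; exact_mod_cast h
      exact_mod_cast h2
    · intro h
      have h2 : ((1 + k : ℕ) : Int) ∣ ((n : ℕ) : Int) := Int.natCast_dvd_natCast.mpr h
      push_cast at h2
      exact_mod_cast h2
  rw [hcnt, pv_countP_range (fun k => (1 + k) ∣ n)]
  have hbij : ((Finset.range n).filter (fun k => (1 + k) ∣ n)).card = n.divisors.card := by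
    refine Finset.card_bij' (fun k _ => 1 + k) (fun d _ => d - 1) ?_ ?_ ?_ ?_
    · intro k hk
      simp only [Finset.mem_filter, Finset.mem_range] at hk
      simp only [Nat.mem_divisors]
      exact ⟨hk.2, by omega⟩
    · intro d hd
      simp only [Nat.mem_divisors] at hd
      have hdpos : 0 < d := Nat.pos_of_dvd_of_pos hd.1 (by omega)
      have hdle : d ≤ n := Nat.le_of_dvd (by omega) hd.1
      simp only [Finset.mem_filter, Finset.mem_range]
      constructor
      · omega
      · have : 1 + (d - 1) = d := by omega
        rw [this]; exact hd.1
    · intro k hk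
      show 1 + k - 1 = k
      omega
    · intro d hd
      simp only [Nat.mem_divisors] at hd
      have hdpos : 0 < d := Nat.pos_of_dvd_of_pos hd.1 (by omega)
      show 1 + (d - 1) = d
      omega
  rw [hbij]
  omega

-- parity of the divisor count: odd iff perfect square
lemma pv_parity (n : ℕ) (hn : 1 ≤ n) :
    (n.divisors.card % 2 = 0) ↔ ¬ (Nat.sqrt n * Nat.sqrt n = n) := by
  have hn0 : n ≠ 0 := by omega
  have hcard : n.divisors.card
      = (n.divisors.filter (fun d => d * d < n)).card
        + (n.divisors.filter (fun d => d * d = n)).card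
        + (n.divisors.filter (fun d => n < d * d)).card := by
    have hu : n.divisors
        = ((n.divisors.filter (fun d => d * d < n))
            ∪ (n.divisors.filter (fun d => d * d = n)))
          ∪ (n.divisors.filter (fun d => n < d * d)) := by
      ext d
      simp only [Finset.mem_union, Finset.mem_filter]
      constructor
      · intro hd
        rcases lt_trichotomy (d * d) n with h | h | h
        · exact Or.inl (Or.inl ⟨hd, h⟩)
        · exact Or.inl (Or.inr ⟨hd, h⟩)
        · exact Or.inr ⟨hd, h⟩
      · rintro ((⟨hd, _⟩ | ⟨hd, _⟩) | ⟨hd, _⟩) <;> exact hd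
    have hd1 : Disjoint (n.divisors.filter (fun d => d * d < n))
        (n.divisors.filter (fun d => d * d = n)) := by
      rw [Finset.disjoint_filter]
      intro d _ h1 h2; omega
    have hd2 : Disjoint ((n.divisors.filter (fun d => d * d < n))
          ∪ (n.divisors.filter (fun d => d * d = n)))
        (n.divisors.filter (fun d => n < d * d)) := by
      rw [Finset.disjoint_left]
      intro d hdl hdr
      simp only [Finset.mem_union, Finset.mem_filter] at hdl hdr
      rcases hdl with ⟨_, h⟩ | ⟨_, h⟩ <;> omega
    conv_lhs => rw [hu]
    rw [Finset.card_union_of_disjoint hd2, Finset.card_union_of_disjoint hd1]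
  have hbij : (n.divisors.filter (fun d => d * d < n)).card
      = (n.divisors.filter (fun d => n < d * d)).card := by
    apply Finset.card_bij' (fun d _ => n / d) (fun d _ => n / d)
    · intro d hd
      simp only [Finset.mem_filter, Nat.mem_divisors] at hd ⊢
      obtain ⟨⟨hdvd, _⟩, hlt⟩ := hd
      have hdpos : 0 < d := Nat.pos_of_dvd_of_pos hdvd (by omega)
      have hde : d * (n / d) = n := Nat.mul_div_cancel' hdvd
      refine ⟨⟨Nat.div_dvd_of_dvd hdvd, hn0⟩, ?_⟩
      have hdlt : d < n / d := by nlinarith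
      nlinarith
    · intro d hd
      simp only [Finset.mem_filter, Nat.mem_divisors] at hd ⊢
      obtain ⟨⟨hdvd, _⟩, hlt⟩ := hd
      have hdpos : 0 < d := Nat.pos_of_dvd_of_pos hdvd (by omega)
      have hde : d * (n / d) = n := Nat.mul_div_cancel' hdvd
      refine ⟨⟨Nat.div_dvd_of_dvd hdvd, hn0⟩, ?_⟩
      have hqpos : 0 < n / d := by
        rcases Nat.eq_zero_or_pos (n / d) with h | h
        · rw [h] at hde; omega
        · exact h
      have hqlt : n / d < d := by nlinarith
      nlinarith
    · intro d hd
      simp only [Finset.mem_filter, Nat.mem_divisors] at hd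
      exact Nat.div_div_self hd.1.1 hn0
    · intro d hd
      simp only [Finset.mem_filter, Nat.mem_divisors] at hd
      exact Nat.div_div_self hd.1.1 hn0
  by_cases hsq : Nat.sqrt n * Nat.sqrt n = n
  · have hmid : n.divisors.filter (fun d => d * d = n) = {Nat.sqrt n} := by
      ext d
      simp only [Finset.mem_filter, Nat.mem_divisors, Finset.mem_singleton]
      constructor
      · rintro ⟨_, hdd⟩
        have := Nat.sqrt_eq d
        rw [hdd] at this; omega
      · rintro rfl
        exact ⟨⟨⟨Nat.sqrt n, hsq.symm⟩, hn0⟩, hsq⟩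
    rw [hmid, Finset.card_singleton] at hcard
    simp only [hsq, not_true_eq_false, iff_false]
    omega
  · have hmid : n.divisors.filter (fun d => d * d = n) = ∅ := by
      ext d
      simp only [Finset.mem_filter, Nat.mem_divisors, Finset.notMem_empty, iff_false]
      rintro ⟨_, hdd⟩
      have := Nat.sqrt_eq d
      rw [hdd] at this
      exact hsq (by rw [this, hdd])
    rw [hmid, Finset.card_empty] at hcard
    simp only [hsq, not_false_eq_true, iff_true]
    omega

-- A's loop body adds pvG i
lemma pv_bodyA (s i : Int) :
    (if PySem.Int.mod (pvCnt i) 2 = 0 then s + i else s - i) = s + pvG i := by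
  by_cases hi : 1 ≤ i
  · obtain ⟨n, rfl⟩ : ∃ n : ℕ, i = (n : Int) :=
      ⟨i.toNat, (Int.toNat_of_nonneg (by omega)).symm⟩
    have hn : 1 ≤ n := by exact_mod_cast hi
    rw [pv_cnt_eq_card n hn]
    have h2 : PySem.Int.mod ((n.divisors.card : ℕ) : Int) 2
        = ((n.divisors.card % 2 : ℕ) : Int) := PySem.Int.mod_natCast _ 2
    rw [h2]
    have hpar := pv_parity n hn
    unfold pvG
    simp only [Int.toNat_natCast]
    by_cases hsq : Nat.sqrt n * Nat.sqrt n = n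
    · have hodd : ¬ (n.divisors.card % 2 = 0) := by
        rw [hpar]; tauto
      rw [if_neg (by exact_mod_cast hodd), if_pos ⟨hi, hsq⟩]
      ring
    · have heven : n.divisors.card % 2 = 0 := hpar.mpr hsq
      rw [if_pos (by exact_mod_cast heven), if_neg (by tauto)]
  · have hz : pvCnt i = 0 := by
      unfold pvCnt
      rw [PySem.List.pyRange_one_eq_nil (by omega)]
      rfl
    rw [hz]
    have hm : PySem.Int.mod (0 : Int) 2 = 0 := by
      rw [PySem.Int.mod_eq_emod_of_pos (by norm_num : (0:Int) < 2)]
      decide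
    rw [if_pos hm]
    unfold pvG
    rw [if_neg (by intro h; exact hi h.1)]

-- A's fold is the sum of pvG over the range
lemma pv_foldA (l : List Int) (s : Int) :
    l.foldl (fun sum i =>
      let cnt : Int := (PySem.List.pyRange 1 (i + 1) 1).foldl
        (fun cnt j => if PySem.Int.mod i j = 0 then cnt + 1 else cnt) 0
      if PySem.Int.mod cnt 2 = 0 then sum + i else sum - i) s
      = s + (l.map pvG).sum := by
  induction l generalizing s with
  | nil => simp
  | cons x xs ih =>
    have hx := pv_bodyA s x
    simp only [List.foldl_cons, List.map_cons, List.sum_cons]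
    rw [show ((PySem.List.pyRange 1 (x + 1) 1).foldl
        (fun cnt j => if PySem.Int.mod x j = 0 then cnt + 1 else cnt) 0) = pvCnt x from rfl]
    rw [hx, ih]; ring

-- Finset.Icc for Int peels on the left
lemma pv_Icc_cons (k K : Int) (h : k ≤ K) :
    Finset.Icc k K = insert k (Finset.Icc (k + 1) K) := by
  ext x; simp only [Finset.mem_Icc, Finset.mem_insert]; omega

-- sqLoop computes the sum of the clipped squares from k up to sqrt right
lemma pv_sqLoop (left right k s : Int) (hk : 1 ≤ k) :
    sqLoop left right k s
      = s + ∑ j ∈ Finset.Icc k ((Nat.sqrt right.toNat : ℕ) : Int),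
          (if left ≤ j * j then j * j else 0) := by
  generalize hn : (right + 1 - k).toNat = n
  induction n generalizing k s with
  | zero =>
    have hkr : right < k := by omega
    have hcond : ¬ k * k ≤ right := by nlinarith
    rw [sqLoop, dif_neg hcond]
    have hK : ((Nat.sqrt right.toNat : ℕ) : Int) < k := by
      have h1 : (Nat.sqrt right.toNat) ≤ right.toNat := Nat.sqrt_le_self _
      have h2 : (right.toNat : Int) ≤ max right 0 := by omega
      omega
    rw [Finset.Icc_eq_empty (by omega), Finset.sum_empty]
    ring
  | succ m ih =>
    by_cases hcond : k * k ≤ right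
    · rw [sqLoop, dif_pos hcond]
      have hkr : k ≤ right := by nlinarith
      have hK : k ≤ ((Nat.sqrt right.toNat : ℕ) : Int) := by
        have hc : ((k.toNat : ℕ) : Int) = k := by omega
        have hr1 : (1:Int) ≤ right := by nlinarith
        have hr : ((right.toNat : ℕ) : Int) = right := by omega
        have h1 : k.toNat * k.toNat ≤ right.toNat := by
          have h3 : ((k.toNat * k.toNat : ℕ) : Int) ≤ ((right.toNat : ℕ) : Int) := by
            push_cast
            push_cast at hc hr
            rw [hc, hr]
            exact hcond
          exact_mod_cast h3
        have h2 : k.toNat ≤ Nat.sqrt right.toNat := Nat.le_sqrt.mpr h1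
        omega
      rw [ih (k + 1) _ (by omega) (by omega)]
      rw [pv_Icc_cons k _ hK, Finset.sum_insert (by simp)]
      split_ifs with h
      · ring
      · ring
    · rw [sqLoop, dif_neg hcond]
      have hK : ((Nat.sqrt right.toNat : ℕ) : Int) < k := by
        have h1 : right.toNat < k.toNat * k.toNat := by
          have hc : ((k.toNat : ℕ) : Int) = k := by omega
          by_cases hr : 0 ≤ right
          · have hrr : ((right.toNat : ℕ) : Int) = right := by omega
            have h3 : ((right.toNat : ℕ) : Int) < ((k.toNat * k.toNat : ℕ) : Int) := by
              push_cast
              push_cast at hc hrr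
              rw [hc, hrr]
              omega
            exact_mod_cast h3
          · have h0 : right.toNat = 0 := by omega
            have hk1 : 1 ≤ k.toNat := by omega
            nlinarith
        have h2 : Nat.sqrt right.toNat < k.toNat := Nat.sqrt_lt.mpr h1
        omega
      rw [Finset.Icc_eq_empty (by omega), Finset.sum_empty]
      ring

-- sum over the range list as a Finset sum
lemma pv_list_sum (f : Int → Int) (L R : Int) (h : L ≤ R + 1) :
    ((PySem.List.pyRange L (R + 1) 1).map f).sum = ∑ i ∈ Finset.Icc L R, f i := by
  generalize hn : (R + 1 - L).toNat = n
  induction n generalizing R with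
  | zero =>
    have hRL : R + 1 = L := by omega
    rw [hRL, PySem.List.pyRange_one_eq_nil (by omega), Finset.Icc_eq_empty (by omega)]
    simp
  | succ m ih =>
    have hLR : L ≤ R := by omega
    rw [PySem.List.pyRange_one_succ_right hLR, List.map_append, List.sum_append]
    have hR1 : R = (R - 1) + 1 := by ring
    rw [hR1, ih (R - 1) (by omega) (by omega), ← hR1]
    have hins : Finset.Icc L R = insert R (Finset.Icc L (R - 1)) := by
      ext x; simp only [Finset.mem_Icc, Finset.mem_insert]; omega
    rw [hins, Finset.sum_insert (by simp)]
    simp [add_comm]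

-- Gauss
lemma pv_gauss (L R : Int) (h : L ≤ R) :
    2 * (∑ i ∈ Finset.Icc L R, i) = (L + R) * (R - L + 1) := by
  generalize hn : (R - L).toNat = n
  induction n generalizing L with
  | zero =>
    have : L = R := by omega
    subst this
    rw [Finset.Icc_self, Finset.sum_singleton]
    ring
  | succ m ih =>
    have hLR : L < R := by omega
    rw [pv_Icc_cons L R (by omega), Finset.sum_insert (by simp)]
    have := ih (L + 1) (by omega) (by omega)
    nlinarith [this]

-- reindex the squares of the range by their square roots
lemma pv_reindex (L R : Int) :
    (∑ i ∈ Finset.Icc L R, (if 1 ≤ i ∧ Nat.sqrt i.toNat * Nat.sqrt i.toNat = i.toNat then i else 0))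
      = ∑ j ∈ Finset.Icc 1 ((Nat.sqrt R.toNat : ℕ) : Int), (if L ≤ j * j then j * j else 0) := by
  rw [← Finset.sum_filter, ← Finset.sum_filter]
  refine Finset.sum_nbij' (i := fun i => ((Nat.sqrt i.toNat : ℕ) : Int))
    (j := fun j => j * j) ?_ ?_ ?_ ?_ ?_
  · intro a ha
    simp only [Finset.mem_filter, Finset.mem_Icc] at ha ⊢
    obtain ⟨⟨hL, hR⟩, h1, hsq⟩ := ha
    have ha0 : ((a.toNat : ℕ) : Int) = a := by omega
    set m := Nat.sqrt a.toNat with hm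
    have hm1 : 1 ≤ m := Nat.le_sqrt.mpr (by omega)
    have hmR : m ≤ Nat.sqrt R.toNat := by
      apply Nat.le_sqrt.mpr
      rw [hsq]
      omega
    refine ⟨⟨by exact_mod_cast hm1, by exact_mod_cast hmR⟩, ?_⟩
    have : ((m * m : ℕ) : Int) = a := by rw [hsq]; omega
    push_cast at this
    rw [this]
    exact hL
  · intro b hb
    simp only [Finset.mem_filter, Finset.mem_Icc] at hb ⊢
    obtain ⟨⟨h1, hK⟩, hL⟩ := hb
    have hb0 : (0:Int) ≤ b := by omega
    have hbt : ((b.toNat : ℕ) : Int) = b := by omega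
    have hKn : 1 ≤ Nat.sqrt R.toNat := by
      have : (1:Int) ≤ ((Nat.sqrt R.toNat : ℕ) : Int) := le_trans h1 hK
      exact_mod_cast this
    have hR1 : (1:Int) ≤ R := by
      have h2 : 1 * 1 ≤ R.toNat := Nat.le_sqrt.mp hKn
      omega
    have hRt : ((R.toNat : ℕ) : Int) = R := by omega
    have hbK : b.toNat ≤ Nat.sqrt R.toNat := by
      have : (b.toNat : Int) ≤ ((Nat.sqrt R.toNat : ℕ) : Int) := by omega
      exact_mod_cast this
    have hbbR : b * b ≤ R := by
      have h3 : b.toNat * b.toNat ≤ R.toNat := Nat.le_sqrt.mp hbK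
      have h4 : ((b.toNat * b.toNat : ℕ) : Int) ≤ ((R.toNat : ℕ) : Int) := by exact_mod_cast h3
      push_cast at h4
      rw [hbt, hRt] at h4
      exact h4
    have hbb1 : (1:Int) ≤ b * b := by nlinarith
    refine ⟨⟨hL, hbbR⟩, hbb1, ?_⟩
    have h5 : (b * b).toNat = b.toNat * b.toNat := by
      rw [← hbt, ← Int.natCast_mul, Int.toNat_natCast]
      rw [hbt]
    rw [h5, Nat.sqrt_eq]
  · intro a ha
    simp only [Finset.mem_filter, Finset.mem_Icc] at ha
    obtain ⟨_, h1, hsq⟩ := ha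
    have : ((Nat.sqrt a.toNat * Nat.sqrt a.toNat : ℕ) : Int) = a := by rw [hsq]; omega
    push_cast at this
    exact this
  · intro b hb
    simp only [Finset.mem_filter, Finset.mem_Icc] at hb
    obtain ⟨⟨h1, _⟩, _⟩ := hb
    have hbt : ((b.toNat : ℕ) : Int) = b := by omega
    have h5 : (b * b).toNat = b.toNat * b.toNat := by
      rw [← hbt, ← Int.natCast_mul, Int.toNat_natCast]
      rw [hbt]
    show ((Nat.sqrt (b * b).toNat : ℕ) : Int) = b
    rw [h5, Nat.sqrt_eq]
    omega
  · intro a ha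
    simp only [Finset.mem_filter, Finset.mem_Icc] at ha
    obtain ⟨_, h1, hsq⟩ := ha
    have : ((Nat.sqrt a.toNat * Nat.sqrt a.toNat : ℕ) : Int) = a := by rw [hsq]; omega
    push_cast at this
    rw [this]

-- ===== VERDICT (by name: the statement is the Claim_ definition above) =====
theorem solution_spec : Claim_equal_solution := by
  unfold Claim_equal_solution
  intro L R _
  unfold Spec_solution solution solution_alt
  by_cases hLR : R < L
  · rw [if_pos hLR, PySem.List.pyRange_one_eq_nil (by omega)]
    rfl
  · rw [if_neg hLR]
    push Not at hLR
    rw [pv_foldA, pv_list_sum pvG L R (by omega)]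
    rw [pv_sqLoop L R 1 0 le_rfl]
    rw [← pv_reindex L R]
    have hg : ∀ i ∈ Finset.Icc L R, pvG i
        = i - 2 * (if 1 ≤ i ∧ Nat.sqrt i.toNat * Nat.sqrt i.toNat = i.toNat then i else 0) := by
      intro i _
      unfold pvG
      split_ifs <;> ring
    rw [Finset.sum_congr rfl hg, Finset.sum_sub_distrib, ← Finset.mul_sum]
    have htot : PySem.Int.floordiv ((L + R) * (R - L + 1)) 2 = ∑ i ∈ Finset.Icc L R, i := by
      rw [← pv_gauss L R hLR]
      rw [PySem.Int.floordiv_eq_ediv_of_pos (by norm_num : (0:Int) < 2)]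
      exact Int.mul_ediv_cancel_left _ (by norm_num)
    rw [htot]
    ring
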